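-- pv_equiv track=rewrite | github.com/MilanFIN/tetris-neat | tetris.py | countHLines
-- ===== SOURCE A (Python) =====
-- def countHLines(blockMap):
-- 	lines = 0
-- 	for y in range(0,20):
-- 		line = True
-- 		for x in range(0, 10):
-- 			if (not (x, y) in blockMap):
-- 				line = False
-- 		if (line):
-- 			lines += 1
-- 	return lines
-- ===== SOURCE B (Python) =====
-- def countHLines(blockMap):
--     rows = {}
--     for cell in blockMap:
--         x, y = cell
--         if 0 <= x < 10 and 0 <= y < 20:
--             rows.setdefault(y, set()).add(x)
--     return sum(1 for cols in rows.values() if len(cols) == 10)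
-- ===== Notes on version B (the rewrite author's own statement) =====
-- stated objective: alternative
-- what changed: Instead of probing all 200 grid cells with a membership test against blockMap, B makes a single pass over blockMap, grouping in-window columns into a per-row set, and counts rows whose set has all 10 columns.
import Mathlib
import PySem

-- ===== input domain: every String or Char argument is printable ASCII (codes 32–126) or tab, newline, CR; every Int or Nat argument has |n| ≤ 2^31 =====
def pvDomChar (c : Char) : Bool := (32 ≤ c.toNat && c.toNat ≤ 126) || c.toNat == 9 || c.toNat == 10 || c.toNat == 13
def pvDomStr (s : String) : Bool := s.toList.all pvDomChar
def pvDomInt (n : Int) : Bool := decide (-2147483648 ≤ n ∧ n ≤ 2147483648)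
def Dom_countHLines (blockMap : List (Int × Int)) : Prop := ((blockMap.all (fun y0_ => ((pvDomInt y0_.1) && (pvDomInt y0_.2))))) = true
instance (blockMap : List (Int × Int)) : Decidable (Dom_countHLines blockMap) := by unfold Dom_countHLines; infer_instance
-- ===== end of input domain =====

-- B replaces A's 200 membership probes into blockMap by one pass over blockMap that groups
-- in-window columns into a per-row set and counts rows owning all 10 columns (objective: alternative, one pass over blockMap).

-- ===== PORT A =====
def countHLines (blockMap : List (Int × Int)) : Int :=
  (PySem.List.pyRange 0 20).foldl (fun lines y =>
    let line := (PySem.List.pyRange 0 10).foldl (fun line x =>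
      if !(blockMap.contains (x, y)) then false else line) true
    if line then lines + 1 else lines) 0

-- ===== PORT B =====
def countHLines_alt (blockMap : List (Int × Int)) : Int :=
  let rows : PySem.Dict Int (PySem.Set Int) := blockMap.foldl
    (fun d c =>
      if 0 ≤ c.1 ∧ c.1 < 10 ∧ 0 ≤ c.2 ∧ c.2 < 20 then
        d.modify c.2 PySem.Set.empty (fun s => PySem.Set.add s c.1)
      else d)
    PySem.Dict.empty
  rows.values.foldl (fun n cols => if cols.length = 10 then n + 1 else n) 0

-- ===== PRECONDITION & SPEC =====
def Spec_countHLines (blockMap : List (Int × Int)) (out : Int) : Prop := out = countHLines_alt blockMap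
instance (blockMap : List (Int × Int)) (out : Int) : Decidable (Spec_countHLines blockMap out) := by unfold Spec_countHLines; infer_instance

-- ===== CLAIM (what is proved, stated in full; the proofs are below) =====
def Claim_equal_countHLines : Prop := ∀ (blockMap : List (Int × Int)), Dom_countHLines blockMap → Spec_countHLines blockMap (countHLines blockMap)

-- ===== LEMMAS AND PROOFS =====

-- proof-only helpers
def pvL (blockMap : List (Int × Int)) : List (Int × Int) :=
  blockMap.filter (fun c => decide (0 ≤ c.1 ∧ c.1 < 10 ∧ 0 ≤ c.2 ∧ c.2 < 20))

def pvCols (blockMap : List (Int × Int)) (y : Int) : List Int :=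
  ((pvL blockMap).filter (fun c => c.2 == y)).map (·.1)

def pvKeys (blockMap : List (Int × Int)) : List Int :=
  PySem.Set.ofList ((pvL blockMap).map (·.2))

def pvFull (blockMap : List (Int × Int)) (y : Int) : Bool :=
  !((PySem.List.pyRange 0 10).any (fun x => !(blockMap.contains (x, y))))

lemma mem_pvCols (bm : List (Int × Int)) (y x : Int) :
    x ∈ pvCols bm y ↔ ((x, y) ∈ bm ∧ 0 ≤ x ∧ x < 10 ∧ 0 ≤ y ∧ y < 20) := by
  simp only [pvCols, pvL, List.mem_map, List.mem_filter, decide_eq_true_eq, beq_iff_eq]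
  constructor
  · rintro ⟨⟨a, b⟩, ⟨⟨hm, h1, h2, h3, h4⟩, hb⟩, ha⟩
    simp only at hb ha
    subst hb; subst ha
    exact ⟨hm, h1, h2, h3, h4⟩
  · rintro ⟨hm, h1, h2, h3, h4⟩
    exact ⟨(x, y), ⟨⟨hm, h1, h2, h3, h4⟩, rfl⟩, rfl⟩

lemma pvFull_iff (bm : List (Int × Int)) (y : Int) :
    pvFull bm y = true ↔ ∀ x ∈ PySem.List.pyRange (0 : Int) 10, (x, y) ∈ bm := by
  simp [pvFull]

lemma pvKeys_nodup (bm : List (Int × Int)) : (pvKeys bm).Nodup :=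
  PySem.Set.nodup_ofList _

lemma mem_pvKeys (bm : List (Int × Int)) (y : Int) :
    y ∈ pvKeys bm ↔ ∃ c ∈ pvL bm, c.2 = y := by
  simp [pvKeys, PySem.Set.mem_ofList, List.mem_map]

lemma pvKeys_bounds (bm : List (Int × Int)) (y : Int) (h : y ∈ pvKeys bm) :
    0 ≤ y ∧ y < 20 := by
  rcases (mem_pvKeys bm y).mp h with ⟨c, hc, hcy⟩
  simp only [pvL, List.mem_filter, decide_eq_true_eq] at hc
  exact ⟨hcy ▸ hc.2.2.2.1, hcy ▸ hc.2.2.2.2⟩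

lemma full_mem_pvKeys (bm : List (Int × Int)) (y : Int) (h1 : 0 ≤ y) (h2 : y < 20)
    (hf : pvFull bm y = true) : y ∈ pvKeys bm := by
  have h0 : ((0 : Int), y) ∈ bm := by
    refine (pvFull_iff bm y).mp hf 0 ?_
    rw [PySem.List.mem_pyRange_one]; omega
  refine (mem_pvKeys bm y).mpr ⟨(0, y), ?_, rfl⟩
  simp only [pvL, List.mem_filter, decide_eq_true_eq]
  exact ⟨h0, by omega, by omega, h1, h2⟩

-- a Nodup list of columns drawn from [0,10) has all 10 columns iff its length is 10
lemma len_eq_ten_iff (S : List Int) (hn : S.Nodup)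
    (hsub : ∀ x ∈ S, x ∈ PySem.List.pyRange (0 : Int) 10) :
    S.length = 10 ↔ ∀ x ∈ PySem.List.pyRange (0 : Int) 10, x ∈ S := by
  have hT : (PySem.List.pyRange (0 : Int) 10).Nodup := by decide
  have hTlen : (PySem.List.pyRange (0 : Int) 10).length = 10 := by decide
  constructor
  · intro hlen
    have hsp : S.Subperm (PySem.List.pyRange (0 : Int) 10) :=
      List.subperm_of_subset hn (fun x hx => hsub x hx)
    obtain ⟨l, hperm, hsl⟩ := hsp
    have hleq : l = PySem.List.pyRange (0 : Int) 10 :=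
      hsl.eq_of_length (by rw [hperm.length_eq, hlen, hTlen])
    intro x hx
    exact hperm.mem_iff.mp (hleq ▸ hx)
  · intro hall
    have hperm : S.Perm (PySem.List.pyRange (0 : Int) 10) :=
      List.perm_of_nodup_nodup_toFinset_eq hn hT (by
        ext x
        simp only [List.mem_toFinset]
        exact ⟨fun hx => hsub x hx, fun hx => hall x hx⟩)
    rw [hperm.length_eq, hTlen]

lemma pvCols_len_iff (bm : List (Int × Int)) (y : Int) (h1 : 0 ≤ y) (h2 : y < 20) :
    (PySem.Set.ofList (pvCols bm y)).length = 10 ↔ pvFull bm y = true := by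
  have hmemS : ∀ x, x ∈ PySem.Set.ofList (pvCols bm y) ↔ ((x, y) ∈ bm ∧ 0 ≤ x ∧ x < 10) := by
    intro x
    rw [PySem.Set.mem_ofList, mem_pvCols]
    constructor
    · rintro ⟨hm, ha, hb, _, _⟩; exact ⟨hm, ha, hb⟩
    · rintro ⟨hm, ha, hb⟩; exact ⟨hm, ha, hb, h1, h2⟩
  rw [len_eq_ten_iff _ (PySem.Set.nodup_ofList _) (by
    intro x hx
    rw [PySem.List.mem_pyRange_one]
    exact ⟨((hmemS x).mp hx).2.1, ((hmemS x).mp hx).2.2⟩), pvFull_iff]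
  constructor
  · intro h x hx
    exact ((hmemS x).mp (h x hx)).1
  · intro h x hx
    rw [PySem.List.mem_pyRange_one] at hx
    exact (hmemS x).mpr ⟨h x (by rw [PySem.List.mem_pyRange_one]; exact hx), hx.1, hx.2⟩

-- the dict lookup after B's grouping loop
lemma getD_rowsFold (L : List (Int × Int)) (d : PySem.Dict Int (PySem.Set Int)) (y : Int) :
    (L.foldl (fun d c => d.modify c.2 PySem.Set.empty (fun s => PySem.Set.add s c.1)) d).getD y PySem.Set.empty
      = PySem.Set.update (d.getD y PySem.Set.empty) ((L.filter (fun c => c.2 == y)).map (·.1)) := by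
  induction L generalizing d with
  | nil => rfl
  | cons c L ih =>
    simp only [List.foldl_cons, ih, List.filter_cons]
    by_cases h : y = c.2
    · subst h
      simp [PySem.Set.update]
    · have hne : (c.2 == y) = false := by
        simp only [beq_eq_false_iff_ne, ne_eq]
        exact fun hh => h hh.symm
      simp [PySem.Dict.getD_modify, h, hne]

-- A counts the full rows of range(20)
lemma countA (bm : List (Int × Int)) :
    countHLines bm = (((PySem.List.pyRange 0 20).countP (fun y => pvFull bm y) : Nat) : Int) := by
  have hinner : ∀ y : Int,
      (PySem.List.pyRange 0 10).foldl (fun line x =>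
        if !(bm.contains (x, y)) then false else line) true = pvFull bm y := by
    intro y
    rw [PySem.List.foldl_if_false_eq]
    simp [pvFull]
  simp only [countHLines, hinner]
  rw [PySem.List.foldl_if_add_one]
  simp

-- B counts the keys whose column-set has 10 elements
lemma countB (bm : List (Int × Int)) :
    countHLines_alt bm
      = (((pvKeys bm).countP (fun y => decide ((PySem.Set.ofList (pvCols bm y)).length = 10)) : Nat) : Int) := by
  simp only [countHLines_alt]
  rw [PySem.List.foldl_ite_eq_foldl_filter
      (p := fun c : Int × Int => 0 ≤ c.1 ∧ c.1 < 10 ∧ 0 ≤ c.2 ∧ c.2 < 20)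
      (f := fun d c => d.modify c.2 PySem.Set.empty (fun s => PySem.Set.add s c.1))
      (init := (PySem.Dict.empty : PySem.Dict Int (PySem.Set Int))) (l := bm)]
  have hnd : ((bm.filter (fun x => decide (0 ≤ x.1 ∧ x.1 < 10 ∧ 0 ≤ x.2 ∧ x.2 < 20))).foldl
      (fun d c => d.modify c.2 PySem.Set.empty (fun s => PySem.Set.add s c.1))
      PySem.Dict.empty).keys.Nodup := by
    apply PySem.Dict.nodup_keys_foldl_modify_key
    simp
  rw [PySem.Dict.values_eq_map_keys _ hnd PySem.Set.empty]
  rw [PySem.List.foldl_ite_add_one]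
  rw [List.countP_map]
  rw [PySem.Dict.keys_foldl_modify_key]
  have hkeys : PySem.Set.update (PySem.Dict.empty : PySem.Dict Int (PySem.Set Int)).keys
      ((bm.filter (fun x => decide (0 ≤ x.1 ∧ x.1 < 10 ∧ 0 ≤ x.2 ∧ x.2 < 20))).map Prod.snd)
      = pvKeys bm := rfl
  rw [hkeys]
  have hfun : List.countP
      ((fun s => decide (List.length s = 10)) ∘ fun k =>
        ((bm.filter (fun x => decide (0 ≤ x.1 ∧ x.1 < 10 ∧ 0 ≤ x.2 ∧ x.2 < 20))).foldl
          (fun d c => d.modify c.2 PySem.Set.empty (fun s => PySem.Set.add s c.1))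
          PySem.Dict.empty).getD k PySem.Set.empty) (pvKeys bm)
      = List.countP (fun y => decide ((PySem.Set.ofList (pvCols bm y)).length = 10)) (pvKeys bm) := by
    apply List.countP_congr
    intro y _
    simp only [Function.comp_apply, getD_rowsFold, PySem.Dict.getD_empty]
    exact Iff.rfl
  rw [hfun]
  simp

lemma counts_eq (bm : List (Int × Int)) :
    (pvKeys bm).countP (fun y => decide ((PySem.Set.ofList (pvCols bm y)).length = 10))
      = (PySem.List.pyRange 0 20).countP (fun y => pvFull bm y) := by
  have hcongr : ∀ y ∈ pvKeys bm,
      decide ((PySem.Set.ofList (pvCols bm y)).length = 10) = pvFull bm y := by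
    intro y hy
    have hb := pvKeys_bounds bm y hy
    have h := pvCols_len_iff bm y hb.1 hb.2
    by_cases hl : (PySem.Set.ofList (pvCols bm y)).length = 10
    · simp [hl, h.mp hl]
    · have hf : pvFull bm y = false := by
        cases hfv : pvFull bm y
        · rfl
        · exact absurd (h.mpr hfv) hl
      simp [hl, hf]
  rw [List.countP_congr (fun y hy => by rw [hcongr y hy])]
  rw [List.countP_eq_length_filter, List.countP_eq_length_filter]
  apply List.Perm.length_eq
  apply List.perm_of_nodup_nodup_toFinset_eq ((pvKeys_nodup bm).filter _)
    ((by decide : (PySem.List.pyRange (0 : Int) 20).Nodup).filter _)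
  ext y
  simp only [List.mem_toFinset, List.mem_filter, PySem.List.mem_pyRange_one]
  constructor
  · rintro ⟨hy, hf⟩
    exact ⟨pvKeys_bounds bm y hy, hf⟩
  · rintro ⟨hy, hf⟩
    exact ⟨full_mem_pvKeys bm y hy.1 hy.2 hf, hf⟩

-- ===== VERDICT (by name: the statement is the Claim_ definition above) =====
theorem countHLines_spec : Claim_equal_countHLines := by
  intro bm _
  unfold Spec_countHLines
  rw [countA, countB, counts_eq]
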